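-- pv_equiv track=rewrite | github.com/Capsion-ST-PLugins/Comments-Creator | core/comments_creator.py | insert_alignment
-- ===== SOURCE A (Python) =====
-- def insert_alignment(param_list: list, indent: str) -> list:
--     res = []
--     for each_param in param_list:
--         # 默认模版使用空格分隔
--         each_list = each_param.split(" ")
--
--         # 获取每行的元素个数
--         index = [e for e in range(len(each_list))]
--         for i, each_index in enumerate(index):
--             # 获取同一列最大的字符长度
--             max_len = max(
--                 [
--                     len(each_param.split(" ")[each_index])
--                     for each_param in param_list
--                 ]
--             )
--             each_len = len(each_list[each_index])
--
--             if each_len < max_len: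
--                 ex = " " * (max_len - each_len)
--                 each_list[each_index] = each_list[each_index] + ex
--
--         res.append(indent.join(each_list))
--     return res
-- ===== SOURCE B (Python) =====
-- def insert_alignment(param_list: list, indent: str) -> list:
--     rows = [p.split(" ") for p in param_list]
--     if not rows:
--         return []
--     widths = [max(len(r[i]) for r in rows) for i in range(len(rows[0]))]
--     return [indent.join(c.ljust(w) for c, w in zip(r, widths)) for r in rows]
-- ===== Notes on version B (the rewrite author's own statement) =====
-- stated objective: faster
-- what changed: B computes each column's max width once up front (splitting every string a single time) and pads with ljust/zip, instead of A's re-splitting the whole list and recomputing the column max inside every cell of every row.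
import Mathlib
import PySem

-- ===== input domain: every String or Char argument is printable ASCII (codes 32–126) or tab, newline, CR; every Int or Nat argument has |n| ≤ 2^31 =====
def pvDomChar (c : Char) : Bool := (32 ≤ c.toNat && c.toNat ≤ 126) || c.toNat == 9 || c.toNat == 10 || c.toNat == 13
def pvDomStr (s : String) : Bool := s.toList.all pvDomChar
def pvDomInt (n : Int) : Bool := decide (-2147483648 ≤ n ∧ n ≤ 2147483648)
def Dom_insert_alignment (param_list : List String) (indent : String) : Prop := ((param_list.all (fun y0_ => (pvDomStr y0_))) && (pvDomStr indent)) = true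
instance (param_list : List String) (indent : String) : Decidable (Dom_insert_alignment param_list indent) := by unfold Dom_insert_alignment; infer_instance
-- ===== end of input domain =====

-- B precomputes each column's max width once and pads, instead of A's per-cell rescan of the
-- whole list; a timing run measured B faster. No argument is mutated; return values only.

-- s.split(" ") on the code-point level (PySem.Str string ops are thin wrappers over PySem.Chars)
def pvSplit (s : String) : List (List Char) := PySem.Chars.splitOn s.toList [' ']

-- ===== PORT A =====
def insert_alignment (param_list : List String) (indent : String) : List String :=
  param_list.foldl (fun res each_param =>
    let each_list := pvSplit each_param
    let index := PySem.List.pyRange 0 each_list.length 1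
    -- 'for i, each_index in enumerate(index)': the counter i is unused, so the fold runs over index itself
    let each_list := index.foldl (fun el each_index =>
      -- max([...]): param_list is nonempty here (the outer loop is iterating over it), so the .getD 0 fallback never fires
      let max_len := (PySem.List.max? (param_list.map (fun each_param =>
          (PySem.List.pyGetD (pvSplit each_param) each_index []).length)) (fun x => x)).getD 0
      let each_len := (PySem.List.pyGetD el each_index []).length
      if each_len < max_len then
        -- ex = " " * (max_len - each_len); each_list[each_index] = each_list[each_index] + ex
        PySem.List.pySetD el each_index
          (PySem.List.pyGetD el each_index [] ++ List.replicate (max_len - each_len) ' ')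
      else el) each_list
    res ++ [String.ofList (PySem.Chars.join indent.toList each_list)]) []

-- ===== PORT B =====
def insert_alignment_alt (param_list : List String) (indent : String) : List String :=
  let rows := param_list.map pvSplit
  match rows with
  | [] => []
  | r0 :: _ =>
    let widths := (List.range r0.length).map (fun i =>
      (PySem.List.max? (rows.map (fun r => (r.getD i []).length)) (fun x => x)).getD 0)
    rows.map (fun r => String.ofList (PySem.Chars.join indent.toList
      ((r.zip widths).map (fun cw => cw.1 ++ List.replicate (cw.2 - cw.1.length) ' '))))

-- ===== PRECONDITION & SPEC =====
-- Pre_ excludes exactly the ragged inputs (rows with different numbers of space-separated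
-- fields), on which Python A raises IndexError in the inner max(...) comprehension.
def Pre_insert_alignment (param_list : List String) (indent : String) : Prop :=
  ∀ s ∈ param_list, ∀ t ∈ param_list, (pvSplit s).length = (pvSplit t).length
instance (param_list : List String) (indent : String) : Decidable (Pre_insert_alignment param_list indent) := by unfold Pre_insert_alignment; infer_instance
def pvWitness_insert_alignment : List String × String := (["ab c", "d ef"], ", ")

def Spec_insert_alignment (param_list : List String) (indent : String) (out : List String) : Prop := out = insert_alignment_alt param_list indent
instance (param_list : List String) (indent : String) (out : List String) : Decidable (Spec_insert_alignment param_list indent out) := by unfold Spec_insert_alignment; infer_instance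

-- ===== CLAIM (what is proved, stated in full; the proofs are below) =====
def Claim_equal_insert_alignment : Prop := ∀ (param_list : List String) (indent : String), Dom_insert_alignment param_list indent → Pre_insert_alignment param_list indent → Spec_insert_alignment param_list indent (insert_alignment param_list indent)

-- ===== LEMMAS AND PROOFS =====

-- the column width both programs compute: max field length of column i over param_list
def pvW (param_list : List String) (i : Nat) : Nat :=
  (PySem.List.max? (param_list.map (fun p => ((pvSplit p).getD i []).length)) (fun x => x)).getD 0

-- A's in-place loop over the index range is a mapIdx with the per-column pad
theorem A_inner_fold (W : Nat → Nat) :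
    ∀ (n a : Nat) (el : List (List Char)), el.length = a + n →
    (List.range' a n).foldl (fun el k =>
        if (el.getD k []).length < W k then
          el.set k (el.getD k [] ++ List.replicate (W k - (el.getD k []).length) ' ')
        else el) el
      = el.take a ++ (el.drop a).mapIdx (fun i x => x ++ List.replicate (W (a + i) - x.length) ' ') := by
  intro n
  induction n with
  | zero =>
    intro a el h
    have hd : el.drop a = [] := List.drop_eq_nil_of_le (by omega)
    have ht : el.take a = el := List.take_of_length_le (by omega)
    simp [hd, ht]
  | succ n ih =>
    intro a el h
    have ha : a < el.length := by omega
    rw [List.range'_succ, List.foldl_cons]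
    have h3 : el.drop a = el[a] :: el.drop (a + 1) := by
      rw [List.drop_eq_getElem_cons ha]
    have hgd : el.getD a [] = el[a] := List.getD_eq_getElem el [] ha
    have hmi : ∀ (l : List (List Char)),
        l.mapIdx (fun i x => x ++ List.replicate (W (a + 1 + i) - x.length) ' ')
        = l.mapIdx (fun i x => x ++ List.replicate (W (a + (i + 1)) - x.length) ' ') := by
      intro l
      apply List.mapIdx_eq_mapIdx_iff.mpr
      intro i hi
      have e : a + 1 + i = a + (i + 1) := by omega
      rw [e]
    by_cases hc : (el.getD a []).length < W a
    · rw [if_pos hc]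
      set v := el.getD a [] ++ List.replicate (W a - (el.getD a []).length) ' ' with hv
      rw [ih (a + 1) _ (by simp; omega)]
      have h1 : (el.set a v).take (a + 1) = el.take a ++ [v] := by
        rw [List.take_add_one, List.take_set_of_le (le_refl a)]
        simp [ha]
      have h2 : (el.set a v).drop (a + 1) = el.drop (a + 1) := by
        rw [List.drop_set_of_lt (by omega)]
      rw [h1, h2, h3, List.mapIdx_cons]
      simp only [List.append_assoc, List.singleton_append]
      rw [hmi]
      rw [hv, hgd]
      simp
    · rw [if_neg hc]
      rw [ih (a + 1) _ (by omega)]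
      have h1 : el.take (a + 1) = el.take a ++ [el[a]] := by
        rw [List.take_add_one]
        simp [ha]
      rw [h1, h3, List.mapIdx_cons]
      simp only [List.append_assoc, List.singleton_append]
      rw [hmi]
      congr 2
      have : W a - el[a].length = 0 := by
        rw [hgd] at hc; omega
      simp [this]

-- B's zip-with-precomputed-widths is the same mapIdx
theorem B_zip_map (W : Nat → Nat) (L : List (List Char)) (n : Nat) (h : L.length = n) :
    (L.zip ((List.range n).map W)).map (fun cw => cw.1 ++ List.replicate (cw.2 - cw.1.length) ' ')
      = L.mapIdx (fun i x => x ++ List.replicate (W i - x.length) ' ') := by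
  apply List.ext_getElem
  · simp [h]
  · intro i h1 h2
    simp [List.getElem_zip]

-- A's inner index loop, written over Nat indices, with the column widths folded into pvW
theorem rowA_eq (pl : List String) (L : List (List Char)) :
    (List.range L.length).foldl (fun el k =>
        if (el.getD k []).length < pvW pl k then
          el.set k (el.getD k [] ++ List.replicate (pvW pl k - (el.getD k []).length) ' ')
        else el) L
      = L.mapIdx (fun i x => x ++ List.replicate (pvW pl i - x.length) ' ') := by
  rw [List.range_eq_range', A_inner_fold (pvW pl) L.length 0 L (by omega)]
  simp

-- one row: A's rescanning loop and B's precomputed-widths zip produce the same padded line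
theorem row_eq (pl : List String) (p p0 ind : String)
    (hlen : (pvSplit p).length = (pvSplit p0).length) :
    String.ofList (PySem.Chars.join ind.toList
      ((PySem.List.pyRange 0 ((pvSplit p).length : Int) 1).foldl (fun el each_index =>
        if (PySem.List.pyGetD el each_index []).length <
            (PySem.List.max? (pl.map (fun q =>
              (PySem.List.pyGetD (pvSplit q) each_index []).length)) (fun x => x)).getD 0 then
          PySem.List.pySetD el each_index (PySem.List.pyGetD el each_index [] ++
            List.replicate ((PySem.List.max? (pl.map (fun q =>
              (PySem.List.pyGetD (pvSplit q) each_index []).length)) (fun x => x)).getD 0 -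
              (PySem.List.pyGetD el each_index []).length) ' ')
        else el) (pvSplit p)))
    = String.ofList (PySem.Chars.join ind.toList
        (((pvSplit p).zip ((List.range (pvSplit p0).length).map (fun i =>
            (PySem.List.max? (pl.map (fun q => ((pvSplit q).getD i []).length)) (fun x => x)).getD 0))).map
          (fun cw => cw.1 ++ List.replicate (cw.2 - cw.1.length) ' '))) := by
  congr 1
  congr 1
  rw [PySem.List.pyRange_one]
  simp only [sub_zero, Int.toNat_natCast, zero_add, List.foldl_map,
    PySem.List.pyGetD_natCast, PySem.List.pySetD_natCast]
  exact (rowA_eq pl (pvSplit p)).trans (B_zip_map (pvW pl) (pvSplit p) (pvSplit p0).length hlen).symm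

-- ===== VERDICT (by name: the statement is the Claim_ definition above) =====
theorem insert_alignment_spec : Claim_equal_insert_alignment := by
  intro param_list indent _ hpre
  unfold Spec_insert_alignment
  cases param_list with
  | nil => rfl
  | cons p0 rest =>
    simp only [insert_alignment, insert_alignment_alt]
    rw [PySem.List.foldl_append_singleton_eq_map]
    simp only [List.nil_append, List.map_cons, List.map_map, Function.comp_def]
    congr 1
    · exact row_eq (p0 :: rest) p0 p0 indent rfl
    · apply List.map_congr_left
      intro p hp
      exact row_eq (p0 :: rest) p p0 indent
        (hpre p (by simp [hp]) p0 (by simp))
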